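-- pv_equiv track=rewrite | github.com/BenSweaterVest/ContinousPerformanceManagementApp | add_missing_attribute_metadata.py | add_missing_metadata_to_attribute
-- ===== SOURCE A (Python) =====
-- def add_missing_metadata_to_attribute(attribute_xml):
--     """Add missing metadata elements to an attribute definition."""
--
--     # Elements to add if missing (in order)
--     missing_elements = []
--
--     # Check what we're missing
--     if '<SourceType>' not in attribute_xml:
--         missing_elements.append('      <SourceType>0</SourceType>')
--
--     if '<IsGlobalFilterEnabled>' not in attribute_xml:
--         missing_elements.append('      <IsGlobalFilterEnabled>0</IsGlobalFilterEnabled>')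
--
--     if '<IsSortableEnabled>' not in attribute_xml:
--         # Determine if sortable based on field type
--         if '<Type>lookup</Type>' in attribute_xml or '<Type>owner</Type>' in attribute_xml:
--             missing_elements.append('      <IsSortableEnabled>0</IsSortableEnabled>')
--         else:
--             missing_elements.append('      <IsSortableEnabled>0</IsSortableEnabled>')
--
--     if '<CanModifyGlobalFilterSettings>' not in attribute_xml:
--         missing_elements.append('      <CanModifyGlobalFilterSettings>1</CanModifyGlobalFilterSettings>')
--
--     if '<CanModifyIsSortableSettings>' not in attribute_xml:
--         missing_elements.append('      <CanModifyIsSortableSettings>1</CanModifyIsSortableSettings>')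
--
--     if '<IsDataSourceSecret>' not in attribute_xml:
--         missing_elements.append('      <IsDataSourceSecret>0</IsDataSourceSecret>')
--
--     if '<AutoNumberFormat>' not in attribute_xml and '<AutoNumberFormat />' not in attribute_xml:
--         # Use empty element format like Microsoft
--         missing_elements.append('      <AutoNumberFormat></AutoNumberFormat>')
--
--     if '<IsSearchable>' not in attribute_xml:
--         # Primary name fields are searchable, others generally not
--         if 'IsPrimaryName>1</IsPrimaryName' in attribute_xml or '<Type>nvarchar</Type>' in attribute_xml:
--             missing_elements.append('      <IsSearchable>1</IsSearchable>')
--         else: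
--             missing_elements.append('      <IsSearchable>0</IsSearchable>')
--
--     if '<IsFilterable>' not in attribute_xml:
--         # Primary keys and lookups are filterable
--         if 'IsPrimaryId>1</IsPrimaryId' in attribute_xml or '<Type>primarykey</Type>' in attribute_xml:
--             missing_elements.append('      <IsFilterable>1</IsFilterable>')
--         else:
--             missing_elements.append('      <IsFilterable>0</IsFilterable>')
--
--     if '<IsRetrievable>' not in attribute_xml:
--         # Most fields are retrievable except lookups to system entities (like createdby)
--         if '<Type>lookup</Type>' in attribute_xml or '<Type>owner</Type>' in attribute_xml:
--             missing_elements.append('      <IsRetrievable>0</IsRetrievable>')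
--         else:
--             missing_elements.append('      <IsRetrievable>1</IsRetrievable>')
--
--     if '<IsLocalizable>' not in attribute_xml:
--         missing_elements.append('      <IsLocalizable>0</IsLocalizable>')
--
--     if not missing_elements:
--         return attribute_xml
--
--     # Find insertion point - after CanModifyAdditionalSettings or before displaynames
--     insertion_points = [
--         '</CanModifyAdditionalSettings>',
--         '<displaynames>',
--         '<Descriptions>',
--         '</attribute>'
--     ]
--
--     for insertion_point in insertion_points:
--         if insertion_point in attribute_xml:
--             # Insert before this point
--             insert_text = '\n'.join(missing_elements) + '\n      '
--             attribute_xml = attribute_xml.replace(insertion_point, insert_text + insertion_point)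
--             return attribute_xml
--
--     return attribute_xml
-- ===== SOURCE B (Python) =====
-- # B: synthesize the missing <Tag>value</Tag> lines from a (tag, value) table by string
-- # formatting, collected by structural recursion, and splice them in with split/join
-- # instead of str.replace; idiomatic/alternative rewrite, same output.
--
-- TAGS = [
--     ('SourceType', lambda x: '0'),
--     ('IsGlobalFilterEnabled', lambda x: '0'),
--     ('IsSortableEnabled', lambda x: '0'),
--     ('CanModifyGlobalFilterSettings', lambda x: '1'),
--     ('CanModifyIsSortableSettings', lambda x: '1'),
--     ('IsDataSourceSecret', lambda x: '0'),
--     ('AutoNumberFormat', lambda x: ''),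
--     ('IsSearchable', lambda x: '1' if 'IsPrimaryName>1</IsPrimaryName' in x or '<Type>nvarchar</Type>' in x else '0'),
--     ('IsFilterable', lambda x: '1' if 'IsPrimaryId>1</IsPrimaryId' in x or '<Type>primarykey</Type>' in x else '0'),
--     ('IsRetrievable', lambda x: '0' if '<Type>lookup</Type>' in x or '<Type>owner</Type>' in x else '1'),
--     ('IsLocalizable', lambda x: '0'),
-- ]
--
--
-- def _missing_lines(x, tags):
--     if not tags:
--         return []
--     tag, value = tags[0]
--     absent = ('<%s>' % tag) not in x and (tag != 'AutoNumberFormat' or '<AutoNumberFormat />' not in x)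
--     head = ['      <%s>%s</%s>' % (tag, value(x), tag)] if absent else []
--     return head + _missing_lines(x, tags[1:])
--
--
-- def add_missing_metadata_to_attribute(attribute_xml):
--     """Add missing metadata elements to an attribute definition."""
--     lines = _missing_lines(attribute_xml, TAGS)
--     if not lines:
--         return attribute_xml
--     for point in ('</CanModifyAdditionalSettings>', '<displaynames>',
--                   '<Descriptions>', '</attribute>'):
--         if point in attribute_xml:
--             glue = '\n'.join(lines) + '\n      ' + point
--             return glue.join(attribute_xml.split(point))
--     return attribute_xml
-- ===== Notes on version B (the rewrite author's own statement) =====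
-- stated objective: alternative
-- what changed: B synthesizes the missing '<Tag>value</Tag>' lines from a (tag, value) table by string formatting (instead of eleven hard-coded literal if-statements), collects them by structural recursion over the table, collapses the dead IsSortableEnabled branch, and splices the block in with split/join around the first present anchor instead of str.replace.
import Mathlib
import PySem

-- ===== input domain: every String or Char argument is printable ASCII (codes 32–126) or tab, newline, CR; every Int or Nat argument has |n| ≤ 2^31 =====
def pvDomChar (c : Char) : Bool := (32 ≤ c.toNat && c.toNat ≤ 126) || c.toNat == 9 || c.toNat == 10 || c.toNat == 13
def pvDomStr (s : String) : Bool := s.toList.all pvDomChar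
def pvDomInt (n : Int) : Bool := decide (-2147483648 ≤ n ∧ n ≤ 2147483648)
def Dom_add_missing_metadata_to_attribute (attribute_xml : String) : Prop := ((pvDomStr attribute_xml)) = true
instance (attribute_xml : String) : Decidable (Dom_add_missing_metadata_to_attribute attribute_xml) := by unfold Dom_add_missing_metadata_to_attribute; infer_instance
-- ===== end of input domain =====

-- B synthesizes the missing <Tag>value</Tag> lines from a (tag, value) table by string
-- formatting, collected by structural recursion, and splices them in via split/join
-- instead of str.replace; alternative decomposition, same output.


-- ===== PORT A =====
-- for-loop over the insertion points with early return
def pvInsertLoopA (attribute_xml : String) (missing : List String) : List String → String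
  | [] => attribute_xml
  | p :: ps =>
      if PySem.Str.isIn p attribute_xml then
        PySem.Str.replace attribute_xml p
          (PySem.Str.join "\n" missing ++ "\n      " ++ p)
      else pvInsertLoopA attribute_xml missing ps

def add_missing_metadata_to_attribute (attribute_xml : String) : String :=
  let m : List String := []
  let m := if !(PySem.Str.isIn "<SourceType>" attribute_xml) then
      m ++ ["      <SourceType>0</SourceType>"] else m
  let m := if !(PySem.Str.isIn "<IsGlobalFilterEnabled>" attribute_xml) then
      m ++ ["      <IsGlobalFilterEnabled>0</IsGlobalFilterEnabled>"] else m
  let m := if !(PySem.Str.isIn "<IsSortableEnabled>" attribute_xml) then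
      (if PySem.Str.isIn "<Type>lookup</Type>" attribute_xml || PySem.Str.isIn "<Type>owner</Type>" attribute_xml then
        m ++ ["      <IsSortableEnabled>0</IsSortableEnabled>"]
      else
        m ++ ["      <IsSortableEnabled>0</IsSortableEnabled>"]) else m
  let m := if !(PySem.Str.isIn "<CanModifyGlobalFilterSettings>" attribute_xml) then
      m ++ ["      <CanModifyGlobalFilterSettings>1</CanModifyGlobalFilterSettings>"] else m
  let m := if !(PySem.Str.isIn "<CanModifyIsSortableSettings>" attribute_xml) then
      m ++ ["      <CanModifyIsSortableSettings>1</CanModifyIsSortableSettings>"] else m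
  let m := if !(PySem.Str.isIn "<IsDataSourceSecret>" attribute_xml) then
      m ++ ["      <IsDataSourceSecret>0</IsDataSourceSecret>"] else m
  let m := if !(PySem.Str.isIn "<AutoNumberFormat>" attribute_xml) && !(PySem.Str.isIn "<AutoNumberFormat />" attribute_xml) then
      m ++ ["      <AutoNumberFormat></AutoNumberFormat>"] else m
  let m := if !(PySem.Str.isIn "<IsSearchable>" attribute_xml) then
      (if PySem.Str.isIn "IsPrimaryName>1</IsPrimaryName" attribute_xml || PySem.Str.isIn "<Type>nvarchar</Type>" attribute_xml then
        m ++ ["      <IsSearchable>1</IsSearchable>"]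
      else
        m ++ ["      <IsSearchable>0</IsSearchable>"]) else m
  let m := if !(PySem.Str.isIn "<IsFilterable>" attribute_xml) then
      (if PySem.Str.isIn "IsPrimaryId>1</IsPrimaryId" attribute_xml || PySem.Str.isIn "<Type>primarykey</Type>" attribute_xml then
        m ++ ["      <IsFilterable>1</IsFilterable>"]
      else
        m ++ ["      <IsFilterable>0</IsFilterable>"]) else m
  let m := if !(PySem.Str.isIn "<IsRetrievable>" attribute_xml) then
      (if PySem.Str.isIn "<Type>lookup</Type>" attribute_xml || PySem.Str.isIn "<Type>owner</Type>" attribute_xml then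
        m ++ ["      <IsRetrievable>0</IsRetrievable>"]
      else
        m ++ ["      <IsRetrievable>1</IsRetrievable>"]) else m
  let m := if !(PySem.Str.isIn "<IsLocalizable>" attribute_xml) then
      m ++ ["      <IsLocalizable>0</IsLocalizable>"] else m
  if m = [] then attribute_xml
  else
    pvInsertLoopA attribute_xml m
      ["</CanModifyAdditionalSettings>", "<displaynames>", "<Descriptions>", "</attribute>"]

-- ===== PORT B =====
-- the (tag, value) table; the marker '<tag>' and the line '      <tag>v</tag>' are synthesized
def pvTags : List (String × (String → String)) :=
  [ ("SourceType", fun _ => "0"),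
    ("IsGlobalFilterEnabled", fun _ => "0"),
    ("IsSortableEnabled", fun _ => "0"),
    ("CanModifyGlobalFilterSettings", fun _ => "1"),
    ("CanModifyIsSortableSettings", fun _ => "1"),
    ("IsDataSourceSecret", fun _ => "0"),
    ("AutoNumberFormat", fun _ => ""),
    ("IsSearchable", fun x =>
      if PySem.Str.isIn "IsPrimaryName>1</IsPrimaryName" x || PySem.Str.isIn "<Type>nvarchar</Type>" x then "1" else "0"),
    ("IsFilterable", fun x =>
      if PySem.Str.isIn "IsPrimaryId>1</IsPrimaryId" x || PySem.Str.isIn "<Type>primarykey</Type>" x then "1" else "0"),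
    ("IsRetrievable", fun x =>
      if PySem.Str.isIn "<Type>lookup</Type>" x || PySem.Str.isIn "<Type>owner</Type>" x then "0" else "1"),
    ("IsLocalizable", fun _ => "0") ]

-- structural recursion over the table (Source B's _missing_lines)
def pvMissingLines (x : String) : List (String × (String → String)) → List String
  | [] => []
  | (tag, value) :: rest =>
      let absent := !(PySem.Str.isIn ("<" ++ tag ++ ">") x) &&
        (tag != "AutoNumberFormat" || !(PySem.Str.isIn "<AutoNumberFormat />" x))
      (if absent then ["      <" ++ tag ++ ">" ++ value x ++ "</" ++ tag ++ ">"] else []) ++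
        pvMissingLines x rest

-- Source B's for-loop over anchors: split at the anchor, rejoin with the block glued on
def pvInsertLoopB (attribute_xml : String) (lines : List String) : List String → String
  | [] => attribute_xml
  | p :: ps =>
      if PySem.Str.isIn p attribute_xml then
        match PySem.Str.split? attribute_xml p with
        | some parts =>
            PySem.Str.join (PySem.Str.join "\n" lines ++ "\n      " ++ p) parts
        | none => attribute_xml   -- unreachable: every anchor is a nonempty literal
      else pvInsertLoopB attribute_xml lines ps

def add_missing_metadata_to_attribute_alt (attribute_xml : String) : String :=
  let lines := pvMissingLines attribute_xml pvTags
  if lines = [] then attribute_xml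
  else
    pvInsertLoopB attribute_xml lines
      ["</CanModifyAdditionalSettings>", "<displaynames>", "<Descriptions>", "</attribute>"]

-- ===== PRECONDITION & SPEC =====
def Spec_add_missing_metadata_to_attribute (attribute_xml : String) (out : String) : Prop := out = add_missing_metadata_to_attribute_alt attribute_xml
instance (attribute_xml : String) (out : String) : Decidable (Spec_add_missing_metadata_to_attribute attribute_xml out) := by unfold Spec_add_missing_metadata_to_attribute; infer_instance

-- ===== CLAIM (what is proved, stated in full; the proofs are below) =====
def Claim_equal_add_missing_metadata_to_attribute : Prop := ∀ (attribute_xml : String), Dom_add_missing_metadata_to_attribute attribute_xml → Spec_add_missing_metadata_to_attribute attribute_xml (add_missing_metadata_to_attribute attribute_xml)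

-- ===== LEMMAS AND PROOFS =====

-- splitOn.go never returns the empty list
theorem pv_go_ne_nil (sep : List Char) :
    ∀ (fuel : Nat) (l cur : List Char) (acc : List (List Char)),
      PySem.Chars.splitOn.go sep fuel l cur acc ≠ [] := by
  intro fuel
  induction fuel with
  | zero => intro l cur acc; simp [PySem.Chars.splitOn.go]
  | succ n ih =>
      intro l cur acc
      cases l with
      | nil => simp [PySem.Chars.splitOn.go]
      | cons c t =>
          simp only [PySem.Chars.splitOn.go]
          split
          · exact ih _ _ _
          · exact ih _ _ _

-- normalization of splitOn.go's accumulators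
theorem pv_go_norm (sep : List Char) :
    ∀ (fuel : Nat) (l cur : List Char) (acc : List (List Char)),
      PySem.Chars.splitOn.go sep fuel l cur acc =
        acc.reverse ++ (PySem.Chars.splitOn.go sep fuel l [] []).modifyHead
          (fun p => cur.reverse ++ p) := by
  intro fuel
  induction fuel with
  | zero => intro l cur acc; simp [PySem.Chars.splitOn.go]
  | succ n ih =>
      intro l cur acc
      cases l with
      | nil => simp [PySem.Chars.splitOn.go]
      | cons c t =>
          simp only [PySem.Chars.splitOn.go, List.reverse_nil]
          split
          · rw [ih _ [] (cur.reverse :: acc), ih _ [] ([[]] : List (List Char))]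
            cases h : PySem.Chars.splitOn.go sep n
                (List.drop sep.length (c :: t)) [] [] with
            | nil => exact absurd h (pv_go_ne_nil sep n _ [] [])
            | cons q qs => simp
          · rw [ih t (c :: cur) acc, ih t [c] ([] : List (List Char))]
            cases h : PySem.Chars.splitOn.go sep n t [] [] with
            | nil => exact absurd h (pv_go_ne_nil sep n _ [] [])
            | cons q qs => simp

-- join distributes over a cons / a modified head (nonempty tail)
theorem pv_join_cons (nw : List Char) (ps : List (List Char)) (h : ps ≠ []) :
    PySem.Chars.join nw ([] :: ps) = nw ++ PySem.Chars.join nw ps := by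
  cases ps with
  | nil => exact absurd rfl h
  | cons q qs => rw [PySem.Chars.join_cons_cons]; rfl

theorem pv_join_modifyHead (nw : List Char) (c : Char) (ps : List (List Char)) (h : ps ≠ []) :
    PySem.Chars.join nw (ps.modifyHead (fun p => c :: p)) =
      c :: PySem.Chars.join nw ps := by
  cases ps with
  | nil => exact absurd rfl h
  | cons q qs =>
      cases qs with
      | nil => simp [PySem.Chars.join_singleton]
      | cons r rs => simp [PySem.Chars.join_cons_cons]

-- the core identity: replace.go computes new.join(split old) (same scan, fused)
theorem pv_replace_go_join (old nw : List Char) (hold : old ≠ []) :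
    ∀ (fuel : Nat) (l : List Char) (acc : List Char), l.length ≤ fuel →
      PySem.Chars.replace.go old nw fuel l acc =
        acc.reverse ++ PySem.Chars.join nw
          (PySem.Chars.splitOn.go old (fuel + 1) l [] []) := by
  intro fuel
  induction fuel with
  | zero =>
      intro l acc hl
      have : l = [] := List.eq_nil_of_length_eq_zero (Nat.le_zero.mp hl)
      subst this
      simp [PySem.Chars.replace.go, PySem.Chars.splitOn.go, PySem.Chars.join_singleton]
  | succ n ih =>
      intro l acc hl
      cases l with
      | nil =>
          simp [PySem.Chars.replace.go, PySem.Chars.splitOn.go, PySem.Chars.join_singleton]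
      | cons c t =>
          simp only [PySem.Chars.replace.go, PySem.Chars.splitOn.go, List.reverse_nil]
          split
          · rename_i hpre
            have hdrop : (List.drop old.length (c :: t)).length ≤ n := by
              have h1 : 1 ≤ old.length := by
                cases old with
                | nil => exact absurd rfl hold
                | cons _ _ => simp
              simp only [List.length_drop]
              omega
            rw [ih _ _ hdrop]
            rw [pv_go_norm old (n + 1) _ [] ([[]] : List (List Char))]
            cases h : PySem.Chars.splitOn.go old (n + 1)
                (List.drop old.length (c :: t)) [] [] with
            | nil => exact absurd h (pv_go_ne_nil old (n + 1) _ [] [])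
            | cons q qs =>
                simp only [List.modifyHead, List.reverse_cons, List.reverse_nil,
                  List.nil_append, List.reverse_append, List.reverse_reverse,
                  List.singleton_append]
                rw [pv_join_cons nw (q :: qs) (by simp)]
                simp
          · rename_i hpre
            have ht : t.length ≤ n := by
              simpa using Nat.lt_succ_iff.mp (by simpa using hl)
            rw [ih t (c :: acc) ht]
            rw [pv_go_norm old (n + 1) t [c] ([] : List (List Char))]
            simp only [List.reverse_cons, List.reverse_nil, List.nil_append,
              List.singleton_append]
            rw [pv_join_modifyHead nw c _ (pv_go_ne_nil old (n + 1) t [] [])]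
            simp

theorem pv_replace_eq_join_splitOn (s old nw : List Char) (h : old ≠ []) :
    PySem.Chars.replace s old nw =
      PySem.Chars.join nw (PySem.Chars.splitOn s old) := by
  unfold PySem.Chars.replace PySem.Chars.splitOn
  rw [if_neg (by simpa using h)]
  simpa using pv_replace_go_join old nw h s.length s [] (le_refl _)

-- lifted to String: A's replace equals B's glue.join(split)
theorem pv_str_replace_eq_join_split (xml p t : String) (parts : List String)
    (hp : p ≠ "") (hs : PySem.Str.split? xml p = some parts) :
    PySem.Str.replace xml p t = PySem.Str.join t parts := by
  apply String.ext
  have hmap : parts.map String.toList = PySem.Chars.splitOn xml.toList p.toList := by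
    have := PySem.Str.split?_map xml p
    rw [hs] at this
    unfold PySem.Chars.split? at this
    rw [if_neg] at this
    · simpa using this
    · simp only [List.isEmpty_iff]
      intro hn; apply hp; apply String.ext; simpa using hn
  have hdata : (PySem.Str.replace xml p t).toList = (PySem.Str.join t parts).toList := by
    rw [PySem.Str.toList_replace, PySem.Str.toList_join, hmap]
    apply pv_replace_eq_join_splitOn
    intro hn; apply hp; apply String.ext; simpa using hn
  simpa using hdata

-- the two anchor loops agree whenever every anchor is nonempty
theorem pv_loops_eq (xml : String) (m : List String) :
    ∀ ps : List String, (∀ p ∈ ps, p ≠ "") →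
      pvInsertLoopA xml m ps = pvInsertLoopB xml m ps := by
  intro ps
  induction ps with
  | nil => intro _; rfl
  | cons p rest ih =>
      intro hne
      simp only [pvInsertLoopA, pvInsertLoopB]
      by_cases hin : PySem.Str.isIn p xml = true
      · rw [if_pos hin, if_pos hin]
        have hp : p ≠ "" := hne p (by simp)
        cases hs : PySem.Str.split? xml p with
        | none =>
            exfalso
            have := PySem.Str.split?_map xml p
            rw [hs] at this
            unfold PySem.Chars.split? at this
            rw [if_neg] at this
            · simp at this
            · simp only [List.isEmpty_iff]
              intro hn; apply hp; apply String.ext; simpa using hn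
        | some parts => exact pv_str_replace_eq_join_split xml p _ parts hp hs
      · rw [if_neg hin, if_neg hin]
        exact ih (fun q hq => hne q (by simp [hq]))

-- the chain of conditional appends: both branch shapes as 'm ++ (optional singleton)'
theorem pv_ite_pair {α : Type} {c : Prop} [Decidable c] (m : List α) (x y : α) :
    (if c then m ++ [x] else m ++ [y]) = m ++ [if c then x else y] := by
  split_ifs <;> simp

theorem pv_ite_app {α : Type} {c : Prop} [Decidable c] (m : List α) (x : α) :
    (if c then m ++ [x] else m) = m ++ (if c then [x] else []) := by
  split_ifs <;> simp

theorem pv_ite_appL {c : Prop} [Decidable c] (X a b : String) :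
    X ++ (if c then a else b) = if c then X ++ a else X ++ b := by
  split_ifs <;> rfl

theorem pv_ite_appR {c : Prop} [Decidable c] (a b Y : String) :
    (if c then a else b) ++ Y = if c then a ++ Y else b ++ Y := by
  split_ifs <;> rfl

-- A's collected list equals B's synthesized lines
set_option maxHeartbeats 1000000 in
theorem pv_lines_eq (xml : String) :
    pvMissingLines xml pvTags =
      (let m : List String := []
       let m := if !(PySem.Str.isIn "<SourceType>" xml) then
           m ++ ["      <SourceType>0</SourceType>"] else m
       let m := if !(PySem.Str.isIn "<IsGlobalFilterEnabled>" xml) then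
           m ++ ["      <IsGlobalFilterEnabled>0</IsGlobalFilterEnabled>"] else m
       let m := if !(PySem.Str.isIn "<IsSortableEnabled>" xml) then
           (if PySem.Str.isIn "<Type>lookup</Type>" xml || PySem.Str.isIn "<Type>owner</Type>" xml then
             m ++ ["      <IsSortableEnabled>0</IsSortableEnabled>"]
           else
             m ++ ["      <IsSortableEnabled>0</IsSortableEnabled>"]) else m
       let m := if !(PySem.Str.isIn "<CanModifyGlobalFilterSettings>" xml) then
           m ++ ["      <CanModifyGlobalFilterSettings>1</CanModifyGlobalFilterSettings>"] else m
       let m := if !(PySem.Str.isIn "<CanModifyIsSortableSettings>" xml) then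
           m ++ ["      <CanModifyIsSortableSettings>1</CanModifyIsSortableSettings>"] else m
       let m := if !(PySem.Str.isIn "<IsDataSourceSecret>" xml) then
           m ++ ["      <IsDataSourceSecret>0</IsDataSourceSecret>"] else m
       let m := if !(PySem.Str.isIn "<AutoNumberFormat>" xml) && !(PySem.Str.isIn "<AutoNumberFormat />" xml) then
           m ++ ["      <AutoNumberFormat></AutoNumberFormat>"] else m
       let m := if !(PySem.Str.isIn "<IsSearchable>" xml) then
           (if PySem.Str.isIn "IsPrimaryName>1</IsPrimaryName" xml || PySem.Str.isIn "<Type>nvarchar</Type>" xml then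
             m ++ ["      <IsSearchable>1</IsSearchable>"]
           else
             m ++ ["      <IsSearchable>0</IsSearchable>"]) else m
       let m := if !(PySem.Str.isIn "<IsFilterable>" xml) then
           (if PySem.Str.isIn "IsPrimaryId>1</IsPrimaryId" xml || PySem.Str.isIn "<Type>primarykey</Type>" xml then
             m ++ ["      <IsFilterable>1</IsFilterable>"]
           else
             m ++ ["      <IsFilterable>0</IsFilterable>"]) else m
       let m := if !(PySem.Str.isIn "<IsRetrievable>" xml) then
           (if PySem.Str.isIn "<Type>lookup</Type>" xml || PySem.Str.isIn "<Type>owner</Type>" xml then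
             m ++ ["      <IsRetrievable>0</IsRetrievable>"]
           else
             m ++ ["      <IsRetrievable>1</IsRetrievable>"]) else m
       let m := if !(PySem.Str.isIn "<IsLocalizable>" xml) then
           m ++ ["      <IsLocalizable>0</IsLocalizable>"] else m
       m) := by
  simp only [pvTags, pvMissingLines]
  simp only [pv_ite_pair, pv_ite_app, pv_ite_appL, pv_ite_appR, ite_self]
  simp [List.append_assoc]

theorem pv_assemble (xml : String) (m1 m2 : List String) (h : m1 = m2) :
    (if m1 = [] then xml
     else pvInsertLoopA xml m1
       ["</CanModifyAdditionalSettings>", "<displaynames>", "<Descriptions>", "</attribute>"]) =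
    (if m2 = [] then xml
     else pvInsertLoopB xml m2
       ["</CanModifyAdditionalSettings>", "<displaynames>", "<Descriptions>", "</attribute>"]) := by
  subst h
  split
  · rfl
  · exact pv_loops_eq xml m1 _ (by intro p hp; fin_cases hp <;> simp)

-- ===== VERDICT (by name: the statement is the Claim_ definition above) =====
set_option maxHeartbeats 1000000 in
theorem add_missing_metadata_to_attribute_spec : Claim_equal_add_missing_metadata_to_attribute := by
  intro xml _
  unfold Spec_add_missing_metadata_to_attribute
  unfold add_missing_metadata_to_attribute add_missing_metadata_to_attribute_alt
  exact pv_assemble xml _ _ (pv_lines_eq xml).symm
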